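-- pv_equiv track=rewrite | github.com/hazza312/AdventOfCode | python/07.py | folder_sums
-- ===== SOURCE A (Python) =====
-- ROOT_DIR = ()
--
-- def folder_sums(folders):
--     folders = sorted(folders, key=lambda f: len(f[0]), reverse=True)
--     sums = {}
--
--     for folder, files in folders:
--         file_sum = sum(size for size, _ in files)
--         child_dir_sum = sums.get(folder, 0)
--         sums[folder] = file_sum + child_dir_sum
--
--         if folder != ROOT_DIR:
--             parent = folder[:-1]
--             if parent not in sums:
--                 sums[parent] = 0
--
--             sums[parent] += sums[folder]
--
--     return sums
-- ===== SOURCE B (Python) =====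
-- def folder_sums(folders):
--     # Direct subtree summation: index each folder's files and its children once,
--     # then compute every key's final value top-down by recursive subtree sums;
--     # the sorted pass only fixes the output dict's key order (no running
--     # accumulation, no propagation of partial sums through a mutable dict).
--     files_of = {}
--     children = {}
--     for folder, files in folders:
--         files_of[folder] = files
--         if folder != ():
--             children.setdefault(folder[:-1], []).append(folder)
--
--     def val(k):
--         total = sum(size for size, _ in files_of.get(k, ()))
--         for c in children.get(k, ()):
--             total += val(c)
--         return total
--
--     result = {}
--     for folder, _ in sorted(folders, key=lambda f: len(f[0]), reverse=True):
--         if folder not in result: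
--             result[folder] = val(folder)
--         if folder != () and folder[:-1] not in result:
--             result[folder[:-1]] = val(folder[:-1])
--     return result
-- ===== Notes on version B (the rewrite author's own statement) =====
-- stated objective: alternative
-- what changed: A propagates partial sums bottom-up through a mutable dict in decreasing path-length order; B indexes files and children once and computes each key's final value directly by a top-down recursive subtree sum, using the order only to lay out the output dict.
import Mathlib
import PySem

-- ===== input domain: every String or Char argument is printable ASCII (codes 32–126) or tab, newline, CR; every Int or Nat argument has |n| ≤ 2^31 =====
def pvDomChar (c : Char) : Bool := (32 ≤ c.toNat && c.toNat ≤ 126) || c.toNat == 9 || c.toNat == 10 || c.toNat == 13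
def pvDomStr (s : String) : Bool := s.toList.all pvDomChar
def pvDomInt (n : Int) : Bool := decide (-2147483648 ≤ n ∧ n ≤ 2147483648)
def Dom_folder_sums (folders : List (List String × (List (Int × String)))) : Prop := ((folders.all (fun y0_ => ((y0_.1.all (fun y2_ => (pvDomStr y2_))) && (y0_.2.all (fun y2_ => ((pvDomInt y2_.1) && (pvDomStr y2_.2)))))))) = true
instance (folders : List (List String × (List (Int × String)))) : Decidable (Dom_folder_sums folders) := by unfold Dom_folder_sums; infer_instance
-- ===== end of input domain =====

-- B replaces A's bottom-up propagation of partial sums through a mutable dict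
-- with a direct top-down recursive subtree summation over a children index.

-- len(f[0]) — the sort key used by both programs for the output order
def pathLen (e : List String × (List (Int × String))) : Int := (e.1.length : Int)

-- ===== PORT A =====
def ROOT_DIR : List String := []

-- the body of A's `for folder, files in folders` loop
def folderStep (sums : PySem.Dict (List String) Int)
    (fe : List String × (List (Int × String))) : PySem.Dict (List String) Int :=
  let folder := fe.1
  let file_sum : Int := (fe.2.map (fun p => p.1)).sum
  let child_dir_sum := sums.getD folder 0
  let sums := sums.insert folder (file_sum + child_dir_sum)
  if folder ≠ ROOT_DIR then
    let parent := PySem.List.slice folder none (some (-1))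
    let sums := if sums.contains parent then sums else sums.insert parent 0
    sums.insert parent (sums.getD parent 0 + sums.getD folder 0)
  else sums

def folder_sums (folders : List (List String × (List (Int × String)))) : List (List String × Int) :=
  ((PySem.List.sorted folders pathLen true).foldl folderStep PySem.Dict.empty).items

-- ===== PORT B =====
-- the first loop of B: files_of[folder] = files; children.setdefault(folder[:-1], []).append(folder)
def bIndex (folders : List (List String × (List (Int × String)))) :
    PySem.Dict (List String) (List (Int × String)) × PySem.Dict (List String) (List (List String)) :=
  folders.foldl
    (fun st e =>
      (st.1.insert e.1 e.2,
       if e.1 ≠ [] then st.2.modify (PySem.List.slice e.1 none (some (-1))) [] (fun b => b ++ [e.1])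
       else st.2))
    (PySem.Dict.empty, PySem.Dict.empty)

-- termination measure for valB (proof-side only; B's Python needs none)
def maxLenB (folders : List (List String × (List (Int × String)))) : Nat :=
  folders.foldl (fun m e => max m e.1.length) 0

-- the three lemmas below are cited by valB's decreasing_by
theorem bIndex_snd_aux (l : List (List String × (List (Int × String))))
    (d1 : PySem.Dict (List String) (List (Int × String)))
    (d2 : PySem.Dict (List String) (List (List String))) :
    (l.foldl
      (fun st e =>
        (st.1.insert e.1 e.2,
         if e.1 ≠ [] then st.2.modify (PySem.List.slice e.1 none (some (-1))) [] (fun b => b ++ [e.1])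
         else st.2)) (d1, d2)).2
    = l.foldl
        (fun d e => if e.1 ≠ [] then d.modify e.1.dropLast [] (fun b => b ++ [e.1]) else d) d2 := by
  induction l generalizing d1 d2 with
  | nil => rfl
  | cons e l ih =>
    simp only [List.foldl_cons]
    rw [ih]
    simp only [PySem.List.slice_to_neg_one]

theorem bIndex_snd (folders : List (List String × (List (Int × String)))) :
    (bIndex folders).2 = folders.foldl
      (fun d e => if e.1 ≠ [] then d.modify e.1.dropLast [] (fun b => b ++ [e.1]) else d)
      PySem.Dict.empty := by
  unfold bIndex
  exact bIndex_snd_aux folders PySem.Dict.empty PySem.Dict.empty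

theorem childFold_getD (l : List (List String × (List (Int × String))))
    (d : PySem.Dict (List String) (List (List String))) (c : List String) :
    (l.foldl (fun d e => if e.1 ≠ [] then d.modify e.1.dropLast [] (fun b => b ++ [e.1]) else d) d).getD c []
      = d.getD c [] ++ (l.filter (fun e => !e.1.isEmpty && e.1.dropLast == c)).map (fun e => e.1) := by
  induction l generalizing d with
  | nil => simp
  | cons e l ih =>
    simp only [List.foldl_cons, List.filter_cons]
    by_cases he : e.1 = []
    · rw [show (if e.1 ≠ [] then d.modify e.1.dropLast [] (fun b => b ++ [e.1]) else d) = d by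
        rw [if_neg (by simp [he])]]
      rw [ih]
      have : (!e.1.isEmpty && (e.1.dropLast == c)) = false := by simp [he]
      rw [this]
      simp
    · rw [show (if e.1 ≠ [] then d.modify e.1.dropLast [] (fun b => b ++ [e.1]) else d)
          = d.modify e.1.dropLast [] (fun b => b ++ [e.1]) by rw [if_pos (by simpa using he)]]
      rw [ih]
      by_cases hc : e.1.dropLast = c
      · have hcond : (!e.1.isEmpty && (e.1.dropLast == c)) = true := by
          simp [he, hc]
        rw [hcond, PySem.Dict.getD_modify]
        subst hc
        simp
      · have hcond : (!e.1.isEmpty && (e.1.dropLast == c)) = false := by simp [hc]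
        rw [hcond, PySem.Dict.getD_modify, if_neg (fun h => hc h.symm)]
        simp

theorem maxLenB_bound_aux (l : List (List String × (List (Int × String))))
    (e : List String × (List (Int × String))) (he : e ∈ l) :
    ∀ a : Nat, e.1.length ≤ l.foldl (fun m e => max m e.1.length) a := by
  induction l with
  | nil => cases he
  | cons x t ih =>
    intro a
    have step : ∀ (l : List (List String × (List (Int × String)))) (b : Nat),
        b ≤ l.foldl (fun m e => max m e.1.length) b := by
      intro l
      induction l with
      | nil => intro b; simp
      | cons y u ihu => intro b; exact le_trans (le_max_left _ _) (ihu _)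
    rcases List.mem_cons.mp he with rfl | hm
    · exact le_trans (le_max_right a e.1.length) (step t _)
    · exact ih hm _

theorem maxLenB_bound (folders : List (List String × (List (Int × String))))
    (e : List String × (List (Int × String))) (he : e ∈ folders) : e.1.length ≤ maxLenB folders :=
  maxLenB_bound_aux folders e he 0

theorem mem_bChildren (folders : List (List String × (List (Int × String))))
    (k c : List String) (hc : c ∈ ((bIndex folders).2).getD k []) :
    c.length = k.length + 1 ∧ c.length ≤ maxLenB folders := by
  rw [bIndex_snd, childFold_getD] at hc
  simp only [PySem.Dict.getD_empty, List.nil_append, List.mem_map, List.mem_filter] at hc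
  obtain ⟨e, ⟨hmem, hprop⟩, rfl⟩ := hc
  have h1 : ¬ e.1.isEmpty ∧ e.1.dropLast = k := by
    simpa [Bool.and_eq_true, beq_iff_eq] using hprop
  have hne : e.1 ≠ [] := by simpa [List.isEmpty_iff] using h1.1
  have hlen : e.1.dropLast.length = e.1.length - 1 := List.length_dropLast
  have hpos : 0 < e.1.length := List.length_pos_iff.mpr hne
  refine ⟨?_, maxLenB_bound folders e hmem⟩
  rw [← h1.2, hlen]; omega

-- B's recursive `val(k)`: own files plus the values of the children
def valB (folders : List (List String × (List (Int × String)))) (k : List String) : Int :=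
  (((bIndex folders).2.getD k []).attach).foldl
    (fun t c => t + valB folders c.1)
    ((((bIndex folders).1.getD k []).map (fun p => p.1)).sum)
termination_by (maxLenB folders + 1) - k.length
decreasing_by
  have h := mem_bChildren folders k c.1 c.2
  omega

-- the body of B's output loop over the sorted folders
def resStep (folders : List (List String × (List (Int × String))))
    (res : PySem.Dict (List String) Int)
    (e : List String × (List (Int × String))) : PySem.Dict (List String) Int :=
  let res := if res.contains e.1 then res else res.insert e.1 (valB folders e.1)
  if e.1 ≠ [] then
    let p := PySem.List.slice e.1 none (some (-1))
    if res.contains p then res else res.insert p (valB folders p)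
  else res

def folder_sums_alt (folders : List (List String × (List (Int × String)))) : List (List String × Int) :=
  ((PySem.List.sorted folders pathLen true).foldl (resStep folders) PySem.Dict.empty).items

-- ===== PRECONDITION & SPEC =====
-- Pre_ excludes lists with duplicate folder paths, on which A's repeated in-place
-- re-accumulation double-counts child subtree sums into the ancestors — an accident
-- of its propagation order that no caller relies on (the AoC input has unique paths).
def Pre_folder_sums (folders : List (List String × (List (Int × String)))) : Prop :=
  (folders.map (fun e => e.1)).Nodup
instance (folders : List (List String × (List (Int × String)))) : Decidable (Pre_folder_sums folders) := by unfold Pre_folder_sums; infer_instance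

def pvWitness_folder_sums : (List (List String × (List (Int × String)))) :=
  [(["a"], [(3, "f")]), ([], [(2, "g")])]

def Spec_folder_sums (folders : List (List String × (List (Int × String)))) (out : List (List String × Int)) : Prop := out = folder_sums_alt folders
instance (folders : List (List String × (List (Int × String)))) (out : List (List String × Int)) : Decidable (Spec_folder_sums folders out) := by unfold Spec_folder_sums; infer_instance

-- ===== CLAIM (what is proved, stated in full; the proofs are below) =====
def Claim_equal_folder_sums : Prop := ∀ (folders : List (List String × (List (Int × String)))), Dom_folder_sums folders → Pre_folder_sums folders → Spec_folder_sums folders (folder_sums folders)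

-- ===== LEMMAS AND PROOFS =====

-- file sums of the entries of l whose path is k
def fsumL (l : List (List String × (List (Int × String)))) (k : List String) : Int :=
  ((l.filter (fun e => e.1 == k)).map (fun e => (e.2.map (fun p => p.1)).sum)).sum

-- subtree values of the entries of l that are children of k
def cpend (folders l : List (List String × (List (Int × String)))) (k : List String) : Int :=
  ((l.filter (fun e => !e.1.isEmpty && e.1.dropLast == k)).map (fun e => valB folders e.1)).sum

-- what the still-unprocessed suffix l will eventually contribute to key k
def pend (folders l : List (List String × (List (Int × String)))) (k : List String) : Int :=
  fsumL l k + cpend folders l k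

theorem bIndex_fst_aux (l : List (List String × (List (Int × String))))
    (d1 : PySem.Dict (List String) (List (Int × String)))
    (d2 : PySem.Dict (List String) (List (List String))) :
    (l.foldl
      (fun st e =>
        (st.1.insert e.1 e.2,
         if e.1 ≠ [] then st.2.modify (PySem.List.slice e.1 none (some (-1))) [] (fun b => b ++ [e.1])
         else st.2)) (d1, d2)).1
    = l.foldl (fun d e => d.insert e.1 e.2) d1 := by
  induction l generalizing d1 d2 with
  | nil => rfl
  | cons e l ih => simp only [List.foldl_cons]; rw [ih]

theorem bIndex_fst (folders : List (List String × (List (Int × String)))) :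
    (bIndex folders).1 = folders.foldl (fun d e => d.insert e.1 e.2) PySem.Dict.empty := by
  unfold bIndex
  exact bIndex_fst_aux folders PySem.Dict.empty PySem.Dict.empty

theorem valB_unfold (folders : List (List String × (List (Int × String)))) (k : List String) :
    valB folders k = (((bIndex folders).1.getD k []).map (fun p => p.1)).sum
      + (((bIndex folders).2.getD k []).map (valB folders)).sum := by
  rw [valB]
  rw [List.foldl_attach (f := fun t c => t + valB folders c)]
  rw [PySem.List.foldl_add]

theorem insertFold_not_mem (l : List (List String × (List (Int × String)))) (k : List String)
    (h : k ∉ l.map (fun e => e.1)) :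
    ∀ d : PySem.Dict (List String) (List (Int × String)),
      (l.foldl (fun d e => d.insert e.1 e.2) d).getD k [] = d.getD k [] := by
  induction l with
  | nil => intro d; rfl
  | cons e t ih =>
    intro d
    simp only [List.map_cons, List.mem_cons, not_or] at h
    simp only [List.foldl_cons]
    rw [ih (by simpa using h.2), PySem.Dict.getD_insert_of_ne]
    exact h.1

theorem insertFold_getD (l : List (List String × (List (Int × String))))
    (hnd : (l.map (fun e => e.1)).Nodup) (k : List String) :
    ∀ d : PySem.Dict (List String) (List (Int × String)),
      (l.foldl (fun d e => d.insert e.1 e.2) d).getD k []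
        = (match l.find? (fun e => e.1 == k) with
           | some e => e.2
           | none => d.getD k []) := by
  induction l with
  | nil => intro d; rfl
  | cons e t ih =>
    intro d
    simp only [List.map_cons, List.nodup_cons] at hnd
    simp only [List.foldl_cons]
    by_cases hek : e.1 = k
    · rw [List.find?_cons_of_pos (by simpa using hek)]
      rw [insertFold_not_mem t k (by rw [← hek]; simpa using hnd.1)]
      subst hek
      exact PySem.Dict.getD_insert_self _ _ _ _
    · rw [List.find?_cons_of_neg (by simpa using hek)]
      rw [ih hnd.2]
      cases t.find? (fun e => e.1 == k) with
      | some x => rfl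
      | none =>
        show (d.insert e.1 e.2).getD k [] = d.getD k []
        exact PySem.Dict.getD_insert_of_ne _ _ _ (fun hh => hek hh.symm)

theorem fsumL_find (l : List (List String × (List (Int × String)))) (k : List String)
    (hnd : (l.map (fun e => e.1)).Nodup) :
    fsumL l k = (match l.find? (fun e => e.1 == k) with
                 | some e => (e.2.map (fun p => p.1)).sum
                 | none => 0) := by
  induction l with
  | nil => rfl
  | cons e t ih =>
    simp only [List.map_cons, List.nodup_cons] at hnd
    by_cases hek : e.1 = k
    · rw [List.find?_cons_of_pos (by simpa using hek)]
      have hnil : t.filter (fun x => x.1 == k) = [] := by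
        rw [List.filter_eq_nil_iff]
        intro x hx
        simp only [beq_iff_eq]
        intro hxk
        exact hnd.1 (by rw [hek, ← hxk]; exact List.mem_map_of_mem hx)
      simp [fsumL, hek, hnil]
    · rw [List.find?_cons_of_neg (by simpa using hek)]
      have : fsumL (e :: t) k = fsumL t k := by
        simp [fsumL, hek]
      rw [this, ih hnd.2]

theorem valB_eq (folders : List (List String × (List (Int × String)))) (k : List String)
    (hnd : (folders.map (fun e => e.1)).Nodup) :
    valB folders k = fsumL folders k + cpend folders folders k := by
  rw [valB_unfold, bIndex_fst, bIndex_snd, childFold_getD]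
  simp only [PySem.Dict.getD_empty, List.nil_append, List.map_map]
  rw [insertFold_getD folders hnd k PySem.Dict.empty, fsumL_find folders k hnd]
  have hc : ((folders.filter (fun e => !e.1.isEmpty && e.1.dropLast == k)).map
      ((valB folders) ∘ (fun e => e.1))).sum = cpend folders folders k := by
    simp [cpend, Function.comp_def]
  rw [hc]
  cases folders.find? (fun e => e.1 == k) with
  | some x => rfl
  | none => simp

-- arithmetic decompositions of pend
theorem pend_nil (folders : List (List String × (List (Int × String)))) (k : List String) :
    pend folders [] k = 0 := by simp [pend, fsumL, cpend]

theorem fsumL_cons (e : List String × (List (Int × String)))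
    (l : List (List String × (List (Int × String)))) (k : List String) :
    fsumL (e :: l) k = (if e.1 = k then (e.2.map (fun p => p.1)).sum else 0) + fsumL l k := by
  by_cases h : e.1 = k
  · simp [fsumL, h]
  · simp [fsumL, h]

theorem cpend_cons (folders : List (List String × (List (Int × String))))
    (e : List String × (List (Int × String)))
    (l : List (List String × (List (Int × String)))) (k : List String) :
    cpend folders (e :: l) k
      = (if e.1 ≠ [] ∧ e.1.dropLast = k then valB folders e.1 else 0) + cpend folders l k := by
  by_cases h : e.1 ≠ [] ∧ e.1.dropLast = k
  · have hb : (!e.1.isEmpty && (e.1.dropLast == k)) = true := by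
      simp [h.1, h.2]
    simp [cpend, h]
  · have hb : (!e.1.isEmpty && (e.1.dropLast == k)) = false := by
      rcases not_and_or.mp h with h1 | h2
      · simp [not_not.mp h1]
      · simp [h2]
    simp [cpend, hb, h]

theorem fsumL_nil_of_not_mem (l : List (List String × (List (Int × String)))) (k : List String)
    (h : k ∉ l.map (fun e => e.1)) : fsumL l k = 0 := by
  have hf : l.filter (fun e => e.1 == k) = [] := by
    rw [List.filter_eq_nil_iff]
    intro x hx
    simp only [beq_iff_eq]
    intro hxk
    exact h (hxk ▸ List.mem_map_of_mem hx)
  simp [fsumL, hf]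

theorem cpend_nil_of_short (folders l : List (List String × (List (Int × String)))) (k : List String)
    (h : ∀ b ∈ l, b.1.length ≤ k.length) : cpend folders l k = 0 := by
  have hf : l.filter (fun e => !e.1.isEmpty && e.1.dropLast == k) = [] := by
    rw [List.filter_eq_nil_iff]
    intro x hx hcond
    have h1 : ¬ x.1.isEmpty ∧ x.1.dropLast = k := by
      simpa [Bool.and_eq_true, beq_iff_eq] using hcond
    have hne : x.1 ≠ [] := by simpa [List.isEmpty_iff] using h1.1
    have hpos : 0 < x.1.length := List.length_pos_iff.mpr hne
    have hlen : x.1.dropLast.length = x.1.length - 1 := List.length_dropLast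
    have hx2 := h x hx
    rw [← h1.2, hlen] at hx2
    omega
  simp [cpend, hf]

theorem dropLast_ne (f : List String) (hf : f ≠ []) : f.dropLast ≠ f := by
  intro he
  have hlen : f.dropLast.length = f.length - 1 := List.length_dropLast
  have hpos : 0 < f.length := List.length_pos_iff.mpr hf
  rw [he] at hlen
  omega

-- what one A-loop step does to every lookup
theorem folderStep_getD (Ad : PySem.Dict (List String) Int)
    (e : List String × (List (Int × String))) (k : List String) :
    (folderStep Ad e).getD k 0 =
      if e.1 = [] then
        (if k = [] then (e.2.map (fun p => p.1)).sum + Ad.getD [] 0 else Ad.getD k 0)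
      else
        (if k = e.1.dropLast then
           Ad.getD e.1.dropLast 0 + ((e.2.map (fun p => p.1)).sum + Ad.getD e.1 0)
         else if k = e.1 then (e.2.map (fun p => p.1)).sum + Ad.getD e.1 0
         else Ad.getD k 0) := by
  simp only [folderStep, PySem.List.slice_to_neg_one, ROOT_DIR]
  by_cases hroot : e.1 = []
  · conv_lhs => rw [if_neg (show ¬ e.1 ≠ [] by simpa using hroot)]
    rw [if_pos hroot]
    simp only [hroot, PySem.Dict.getD_insert]
  · have hpne : e.1.dropLast ≠ e.1 := dropLast_ne e.1 hroot
    conv_lhs => rw [if_pos (show e.1 ≠ [] from hroot)]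
    rw [if_neg hroot]
    set V : Int := (e.2.map (fun p => p.1)).sum + Ad.getD e.1 0 with hV
    have hd1f : (Ad.insert e.1 V).getD e.1 0 = V := PySem.Dict.getD_insert_self _ _ _ _
    have hd1p : (Ad.insert e.1 V).getD e.1.dropLast 0 = Ad.getD e.1.dropLast 0 :=
      PySem.Dict.getD_insert_of_ne _ _ _ hpne
    by_cases hcp : (Ad.insert e.1 V).contains e.1.dropLast = true
    · conv_lhs => rw [if_pos hcp]
      rw [PySem.Dict.getD_insert, hd1p, hd1f]
      by_cases hk : k = e.1.dropLast
      · rw [if_pos hk, if_pos hk]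
      · rw [if_neg hk, if_neg hk, PySem.Dict.getD_insert]
    · conv_lhs => rw [if_neg hcp]
      have hAdp : Ad.getD e.1.dropLast 0 = 0 := by
        have hc2 : Ad.contains e.1.dropLast = false := by
          rw [PySem.Dict.contains_insert] at hcp
          cases h : Ad.contains e.1.dropLast with
          | false => rfl
          | true => exact absurd (by simp [h]) hcp
        exact PySem.Dict.getD_of_not_contains _ _ hc2
      have hYp : ((Ad.insert e.1 V).insert e.1.dropLast 0).getD e.1.dropLast 0 = 0 :=
        PySem.Dict.getD_insert_self _ _ _ _
      have hYf : ((Ad.insert e.1 V).insert e.1.dropLast 0).getD e.1 0 = V := by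
        rw [PySem.Dict.getD_insert_of_ne _ _ _ (fun h => hpne h.symm), hd1f]
      rw [PySem.Dict.getD_insert, hYp, hYf]
      by_cases hk : k = e.1.dropLast
      · rw [if_pos hk, if_pos hk, hAdp]
      · rw [if_neg hk, if_neg hk, PySem.Dict.getD_insert_of_ne _ _ _ hk, PySem.Dict.getD_insert]

-- one A-step and one B-step append the same new keys
theorem step_keys_eq (folders : List (List String × (List (Int × String))))
    (Ad Bd : PySem.Dict (List String) Int)
    (e : List String × (List (Int × String))) (hkeys : Ad.keys = Bd.keys) :
    (folderStep Ad e).keys = (resStep folders Bd e).keys := by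
  have hct : ∀ x, Ad.contains x = Bd.contains x := fun x => by
    rw [PySem.Dict.contains_eq_decide_mem_keys, PySem.Dict.contains_eq_decide_mem_keys, hkeys]
  simp only [folderStep, resStep, PySem.List.slice_to_neg_one, ROOT_DIR]
  by_cases hroot : e.1 = []
  · conv_lhs => rw [if_neg (show ¬ e.1 ≠ [] by simpa using hroot)]
    conv_rhs => rw [if_neg (show ¬ e.1 ≠ [] by simpa using hroot)]
    by_cases hc : Bd.contains e.1 = true
    · rw [if_pos hc, PySem.Dict.keys_insert_of_contains _ _ (by rw [hct]; exact hc), hkeys]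
    · rw [if_neg hc,
        PySem.Dict.keys_insert_of_not_contains _ _ (by rw [hct]; exact (Bool.not_eq_true _).mp hc),
        PySem.Dict.keys_insert_of_not_contains _ _ ((Bool.not_eq_true _).mp hc), hkeys]
  · have hpne : e.1.dropLast ≠ e.1 := dropLast_ne e.1 hroot
    conv_lhs => rw [if_pos (show e.1 ≠ [] from hroot)]
    conv_rhs => rw [if_pos (show e.1 ≠ [] from hroot)]
    set V : Int := (e.2.map (fun p => p.1)).sum + Ad.getD e.1 0 with hV
    set R : PySem.Dict (List String) Int :=
      if Bd.contains e.1 = true then Bd else Bd.insert e.1 (valB folders e.1) with hR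
    have hd1keys : (Ad.insert e.1 V).keys = R.keys := by
      rw [hR]
      by_cases hc : Bd.contains e.1 = true
      · rw [if_pos hc, PySem.Dict.keys_insert_of_contains _ _ (by rw [hct]; exact hc), hkeys]
      · rw [if_neg hc,
          PySem.Dict.keys_insert_of_not_contains _ _ (by rw [hct]; exact (Bool.not_eq_true _).mp hc),
          PySem.Dict.keys_insert_of_not_contains _ _ ((Bool.not_eq_true _).mp hc), hkeys]
    have hd1ct : ∀ x, (Ad.insert e.1 V).contains x = R.contains x := by
      intro x
      rw [PySem.Dict.contains_eq_decide_mem_keys, PySem.Dict.contains_eq_decide_mem_keys, hd1keys]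
    by_cases hcp : (Ad.insert e.1 V).contains e.1.dropLast = true
    · conv_lhs => rw [if_pos hcp]
      conv_rhs => rw [if_pos (show R.contains e.1.dropLast = true by rw [← hd1ct]; exact hcp)]
      rw [PySem.Dict.keys_insert_of_contains _ _ hcp, hd1keys]
    · conv_lhs => rw [if_neg hcp]
      conv_rhs => rw [if_neg (show ¬ R.contains e.1.dropLast = true by rw [← hd1ct]; exact hcp)]
      rw [PySem.Dict.keys_insert_of_contains ((Ad.insert e.1 V).insert e.1.dropLast 0) _
          (PySem.Dict.contains_insert_self _ _ _)]
      rw [PySem.Dict.keys_insert_of_not_contains (Ad.insert e.1 V) _ ((Bool.not_eq_true _).mp hcp)]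
      rw [PySem.Dict.keys_insert_of_not_contains R _
          (by rw [← hd1ct]; exact (Bool.not_eq_true _).mp hcp)]
      rw [hd1keys]

-- a B-step keeps every stored entry at its final value valB
theorem resStep_val (folders : List (List String × (List (Int × String))))
    (Bd : PySem.Dict (List String) Int) (e : List String × (List (Int × String)))
    (hB : ∀ k, Bd.contains k = true → Bd.getD k 0 = valB folders k) :
    ∀ k, (resStep folders Bd e).contains k = true →
      (resStep folders Bd e).getD k 0 = valB folders k := by
  have ins : ∀ (d : PySem.Dict (List String) Int) (a : List String),
      (∀ k, d.contains k = true → d.getD k 0 = valB folders k) →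
      (∀ k, (d.insert a (valB folders a)).contains k = true →
        (d.insert a (valB folders a)).getD k 0 = valB folders k) := by
    intro d a hd k hk
    rw [PySem.Dict.getD_insert]
    by_cases hka : k = a
    · rw [if_pos hka, hka]
    · rw [if_neg hka]
      apply hd
      rw [PySem.Dict.contains_insert] at hk
      simpa [hka] using hk
  intro k hk
  simp only [resStep, PySem.List.slice_to_neg_one] at hk ⊢
  by_cases hroot : e.1 = []
  · rw [if_neg (by simp [hroot])] at hk ⊢
    by_cases hc : Bd.contains e.1 = true
    · rw [if_pos hc] at hk ⊢; exact hB k hk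
    · rw [if_neg hc] at hk ⊢; exact ins Bd e.1 hB k hk
  · rw [if_pos (by simpa using hroot)] at hk ⊢
    by_cases hc : Bd.contains e.1 = true
    · rw [if_pos hc] at hk ⊢
      by_cases hcp : Bd.contains e.1.dropLast = true
      · rw [if_pos hcp] at hk ⊢; exact hB k hk
      · rw [if_neg hcp] at hk ⊢; exact ins Bd e.1.dropLast hB k hk
    · rw [if_neg hc] at hk ⊢
      by_cases hcp : (Bd.insert e.1 (valB folders e.1)).contains e.1.dropLast = true
      · rw [if_pos hcp] at hk ⊢; exact ins Bd e.1 hB k hk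
      · rw [if_neg hcp] at hk ⊢
        exact ins _ e.1.dropLast (ins Bd e.1 hB) k hk

-- the main loop invariant: both folds keep identical key lists; A's entry for k is
-- valB k minus what the remaining suffix will still add; B's entries are final values
theorem loop_inv (folders : List (List String × (List (Int × String))))
    (l : List (List String × (List (Int × String))))
    (hndl : (l.map (fun e => e.1)).Nodup)
    (hpw : l.Pairwise (fun a b => b.1.length ≤ a.1.length))
    (Ad Bd : PySem.Dict (List String) Int)
    (hkeys : Ad.keys = Bd.keys)
    (hA : ∀ k, Ad.getD k 0 = valB folders k - pend folders l k)
    (hB : ∀ k, Bd.contains k = true → Bd.getD k 0 = valB folders k) :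
    (l.foldl folderStep Ad).keys = (l.foldl (resStep folders) Bd).keys
    ∧ (∀ k, (l.foldl folderStep Ad).getD k 0 = valB folders k)
    ∧ (∀ k, (l.foldl (resStep folders) Bd).contains k = true →
        (l.foldl (resStep folders) Bd).getD k 0 = valB folders k) := by
  induction l generalizing Ad Bd with
  | nil =>
    refine ⟨hkeys, ?_, hB⟩
    intro k
    have h := hA k
    rw [pend_nil] at h
    simpa using h
  | cons e l ih =>
    have hnd1 : e.1 ∉ l.map (fun x => x.1) := by
      simpa using (List.nodup_cons.mp hndl).1
    have hndt := (List.nodup_cons.mp hndl).2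
    have hple : ∀ b ∈ l, b.1.length ≤ e.1.length := (List.pairwise_cons.mp hpw).1
    have hpwt := (List.pairwise_cons.mp hpw).2
    have hfl : fsumL l e.1 = 0 := fsumL_nil_of_not_mem l e.1 hnd1
    have hcl : cpend folders l e.1 = 0 := cpend_nil_of_short folders l e.1 hple
    have hpendf : pend folders (e :: l) e.1 = (e.2.map (fun p => p.1)).sum := by
      unfold pend
      rw [fsumL_cons, cpend_cons, hfl, hcl]
      have h2 : ¬ (e.1 ≠ [] ∧ e.1.dropLast = e.1) := by
        rintro ⟨ha, hb⟩
        exact dropLast_ne e.1 ha hb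
      rw [if_pos rfl, if_neg h2]
      ring
    have hAf : Ad.getD e.1 0 = valB folders e.1 - (e.2.map (fun p => p.1)).sum := by
      rw [hA e.1, hpendf]
    have hApend : ∀ k, k ≠ e.1 → ¬ (e.1 ≠ [] ∧ e.1.dropLast = k) →
        pend folders (e :: l) k = pend folders l k := by
      intro k hk hcnd
      unfold pend
      rw [fsumL_cons, cpend_cons, if_neg (fun h => hk h.symm), if_neg hcnd]
      ring
    have hpendlf : pend folders l e.1 = 0 := by
      unfold pend; rw [hfl, hcl]; ring
    simp only [List.foldl_cons]
    apply ih hndt hpwt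
    · exact step_keys_eq folders Ad Bd e hkeys
    · intro k
      rw [folderStep_getD]
      by_cases hroot : e.1 = []
      · rw [if_pos hroot]
        by_cases hk : k = []
        · rw [if_pos hk, hk, ← hroot, hAf]
          rw [hroot] at hpendlf ⊢
          rw [hpendlf]
          ring
        · rw [if_neg hk, hA k, hApend k (fun h => hk (h.trans hroot)) (by simp [hroot])]
      · rw [if_neg hroot]
        by_cases hk : k = e.1.dropLast
        · rw [if_pos hk, hAf, hA e.1.dropLast]
          have hpp : pend folders (e :: l) e.1.dropLast
              = valB folders e.1 + pend folders l e.1.dropLast := by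
            unfold pend
            rw [fsumL_cons, cpend_cons,
              if_neg (fun h => dropLast_ne e.1 hroot h.symm),
              if_pos ⟨hroot, rfl⟩]
            ring
          rw [hpp, hk]
          ring
        · rw [if_neg hk]
          by_cases hk2 : k = e.1
          · rw [if_pos hk2, hAf, hk2, hpendlf]
            ring
          · rw [if_neg hk2, hA k,
              hApend k hk2 (fun h => hk (h.2.symm ▸ rfl))]
    · exact resStep_val folders Bd e hB

-- keys of both folds stay duplicate-free
theorem nodup_keys_foldA (l : List (List String × (List (Int × String))))
    (d : PySem.Dict (List String) Int) (hd : d.keys.Nodup) :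
    (l.foldl folderStep d).keys.Nodup := by
  induction l generalizing d with
  | nil => exact hd
  | cons e l ih =>
    apply ih
    simp only [folderStep]
    split_ifs <;>
      first
        | exact PySem.Dict.nodup_keys_insert _ _ _ (PySem.Dict.nodup_keys_insert _ _ _
            (PySem.Dict.nodup_keys_insert _ _ _ hd))
        | exact PySem.Dict.nodup_keys_insert _ _ _ (PySem.Dict.nodup_keys_insert _ _ _ hd)
        | exact PySem.Dict.nodup_keys_insert _ _ _ hd

theorem nodup_keys_foldB (folders l : List (List String × (List (Int × String))))
    (d : PySem.Dict (List String) Int) (hd : d.keys.Nodup) :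
    (l.foldl (resStep folders) d).keys.Nodup := by
  induction l generalizing d with
  | nil => exact hd
  | cons e l ih =>
    apply ih
    simp only [resStep]
    split_ifs <;>
      first
        | exact PySem.Dict.nodup_keys_insert _ _ _ (PySem.Dict.nodup_keys_insert _ _ _ hd)
        | exact PySem.Dict.nodup_keys_insert _ _ _ hd
        | exact hd

-- two dicts with the same key list and the same lookups have the same items
theorem items_ext (d1 d2 : PySem.Dict (List String) Int) (hk : d1.keys = d2.keys)
    (h1 : d1.keys.Nodup) (h2 : d2.keys.Nodup)
    (hv : ∀ k ∈ d2.keys, d1.getD k 0 = d2.getD k 0) : d1.items = d2.items := by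
  rw [PySem.Dict.items_eq_map_keys d1 h1 0, PySem.Dict.items_eq_map_keys d2 h2 0, hk]
  apply List.map_congr_left
  intro k hkm
  rw [hv k hkm]

-- ===== VERDICT (by name: the statement is the Claim_ definition above) =====
theorem folder_sums_spec : Claim_equal_folder_sums := by
  intro folders _ hnd
  unfold Pre_folder_sums at hnd
  unfold Spec_folder_sums folder_sums folder_sums_alt
  have hperm : (PySem.List.sorted folders pathLen true).Perm folders :=
    PySem.List.sorted_perm folders pathLen true
  have hndl : ((PySem.List.sorted folders pathLen true).map (fun e => e.1)).Nodup :=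
    (List.Perm.nodup_iff (hperm.map (fun e => e.1))).mpr hnd
  have hpw : (PySem.List.sorted folders pathLen true).Pairwise
      (fun a b => b.1.length ≤ a.1.length) := by
    have h := PySem.List.sorted_pairwise_rev (xs := folders) (key := pathLen)
    exact h.imp (fun hab => by simpa [pathLen] using hab)
  have hA0 : ∀ k, (PySem.Dict.empty : PySem.Dict (List String) Int).getD k 0
      = valB folders k - pend folders (PySem.List.sorted folders pathLen true) k := by
    intro k
    have hpend : pend folders (PySem.List.sorted folders pathLen true) k = valB folders k := by
      rw [valB_eq folders k hnd]
      unfold pend fsumL cpend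
      rw [List.Perm.sum_eq ((hperm.filter _).map _), List.Perm.sum_eq ((hperm.filter _).map _)]
    rw [hpend, PySem.Dict.getD_empty]
    ring
  obtain ⟨hk, hAv, hBv⟩ := loop_inv folders (PySem.List.sorted folders pathLen true) hndl hpw
    PySem.Dict.empty PySem.Dict.empty rfl hA0
    (by intro k hc; rw [PySem.Dict.contains_empty] at hc; cases hc)
  apply items_ext _ _ hk
  · exact nodup_keys_foldA _ _ PySem.Dict.nodup_keys_empty
  · exact nodup_keys_foldB _ _ _ PySem.Dict.nodup_keys_empty
  · intro k hkm
    rw [hAv k, hBv k (by rw [PySem.Dict.contains_eq_decide_mem_keys]; simpa using hkm)]
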